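-- pv_equiv track=rewrite | github.com/BenjaminGirard/maths-201yams | roll_comb_list.py | roll_comb
-- ===== SOURCE A (Python) =====
-- def roll_comb(dices):
--     init_list = [[1] * dices]
--     curr_list = [1] * dices
--     while curr_list != [6] * dices:
--         off = 0
--         if curr_list[0] < 6:
--             curr_list[0] += 1
--         else:
--             while curr_list[off] == 6:
--                 curr_list[off] = 1
--                 off += 1
--             curr_list[off] += 1
--         init_list.append(list(curr_list))
--     return init_list
-- ===== SOURCE B (Python) =====
-- def roll_comb(dices):
--     n = dices if dices > 0 else 0
--     return [[i // 6**k % 6 + 1 for k in range(n)] for i in range(6**n)]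
-- ===== Notes on version B (the rewrite author's own statement) =====
-- stated objective: alternative
-- what changed: Replaces the stateful odometer (increment-with-carry on a mutable list, appending snapshots) by a direct closed-form enumeration: each combination is computed independently from its ordinal index i as the base-6 digits of i (least-significant first) plus 1.
import Mathlib
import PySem

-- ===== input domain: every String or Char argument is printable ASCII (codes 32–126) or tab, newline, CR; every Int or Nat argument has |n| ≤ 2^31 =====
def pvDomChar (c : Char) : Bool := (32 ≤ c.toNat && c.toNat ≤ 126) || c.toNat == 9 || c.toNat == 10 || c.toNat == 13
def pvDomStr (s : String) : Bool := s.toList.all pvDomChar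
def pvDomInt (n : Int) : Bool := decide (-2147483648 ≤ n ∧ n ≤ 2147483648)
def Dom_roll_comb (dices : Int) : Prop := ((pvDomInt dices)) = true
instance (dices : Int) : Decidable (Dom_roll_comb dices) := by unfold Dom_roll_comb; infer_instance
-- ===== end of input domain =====

-- B replaces A's stateful odometer (increment-with-carry on a mutable list) by computing
-- each combination directly from its ordinal index as base-6 digits plus 1.
-- A's Python mutates only local state; the equivalence is about the return value.

-- ===== PORT A =====

-- inner `while curr_list[off] == 6: curr_list[off] = 1; off += 1` then `curr_list[off] += 1`,
-- as structural recursion over the list starting at offset 0; on [] Python would raise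
-- IndexError, unreachable because the outer loop guard guarantees a non-6 digit.
def rcCarry (l : List Int) : List Int :=
  match l with
  | [] => []
  | x :: rest => if x = 6 then 1 :: rcCarry rest else (x + 1) :: rest

-- one iteration of the outer loop body (the mutation of curr_list)
def rcStep (l : List Int) : List Int :=
  match l with
  | [] => []
  | x :: rest => if x < 6 then (x + 1) :: rest else rcCarry (x :: rest)

-- the `while curr_list != [6]*dices` loop; fuel = 6^n iterations always suffices
def rcLoop (fuel : Nat) (curr : List Int) (acc : List (List Int)) (n : Nat) :
    List (List Int) :=
  match fuel with
  | 0 => acc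
  | fuel + 1 =>
    if curr = List.replicate n 6 then acc
    else
      let c := rcStep curr
      rcLoop fuel c (acc ++ [c]) n

def roll_comb (dices : Int) : List (List Int) :=
  let n := dices.toNat   -- [1]*dices is [] for dices ≤ 0
  rcLoop (6 ^ n) (List.replicate n 1) [List.replicate n 1] n

-- ===== PORT B =====
def roll_comb_alt (dices : Int) : List (List Int) :=
  let n := if dices > 0 then dices.toNat else 0
  (List.range (6 ^ n)).map (fun i =>
    (List.range n).map (fun k => ((i / 6 ^ k % 6 : Nat) : Int) + 1))

-- ===== PRECONDITION & SPEC =====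
def Spec_roll_comb (dices : Int) (out : List (List Int)) : Prop := out = roll_comb_alt dices
instance (dices : Int) (out : List (List Int)) : Decidable (Spec_roll_comb dices out) := by unfold Spec_roll_comb; infer_instance

-- ===== CLAIM (what is proved, stated in full; the proofs are below) =====
def Claim_equal_roll_comb : Prop := ∀ (dices : Int), Dom_roll_comb dices → Spec_roll_comb dices (roll_comb dices)

-- ===== LEMMAS AND PROOFS =====

-- the i-th combination: base-6 digits of i (least significant first), plus 1
def rcDigits (n i : Nat) : List Int :=
  (List.range n).map (fun k => ((i / 6 ^ k % 6 : Nat) : Int) + 1)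

theorem rcDigits_zero (n : Nat) : rcDigits n 0 = List.replicate n 1 := by
  simp [rcDigits]

theorem rcDigits_succ (n i : Nat) :
    rcDigits (n + 1) i = (((i % 6 : Nat) : Int) + 1) :: rcDigits n (i / 6) := by
  simp only [rcDigits, List.range_succ_eq_map, List.map_cons, List.map_map]
  congr 1
  · simp
  · apply List.map_congr_left
    intro k _
    simp [pow_succ', Nat.div_div_eq_div_mul]

theorem rcDigits_max (n : Nat) : rcDigits n (6 ^ n - 1) = List.replicate n 6 := by
  induction n with
  | zero => simp [rcDigits]
  | succ n ih =>
    have h1 : (1:Nat) ≤ 6 ^ n := Nat.one_le_pow _ _ (by norm_num)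
    have hmod : (6 ^ (n + 1) - 1) % 6 = 5 := by
      have : 6 ^ (n + 1) - 1 = 6 * (6 ^ n - 1) + 5 := by
        rw [pow_succ]; omega
      omega
    have hdiv : (6 ^ (n + 1) - 1) / 6 = 6 ^ n - 1 := by
      have : 6 ^ (n + 1) - 1 = 6 * (6 ^ n - 1) + 5 := by
        rw [pow_succ]; omega
      omega
    rw [rcDigits_succ, hmod, hdiv, ih, List.replicate_succ]
    norm_num

theorem rcDigits_ne_max (n i : Nat) (h : i + 1 < 6 ^ n) :
    rcDigits n i ≠ List.replicate n 6 := by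
  induction n generalizing i with
  | zero => simp at h
  | succ n ih =>
    rw [rcDigits_succ, List.replicate_succ]
    by_cases h5 : i % 6 = 5
    · have hd : i / 6 + 1 < 6 ^ n := by
        have := Nat.div_add_mod i 6
        have hp : 6 ^ (n + 1) = 6 * 6 ^ n := by rw [pow_succ]; ring
        omega
      intro hc
      rw [List.cons.injEq] at hc
      exact ih (i / 6) hd hc.2
    · intro hc
      rw [List.cons.injEq] at hc
      have := hc.1
      have h6 : i % 6 < 6 := Nat.mod_lt _ (by norm_num)
      omega

theorem rcCarry_digits (n i : Nat) (h : i + 1 < 6 ^ n) :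
    rcCarry (rcDigits n i) = rcDigits n (i + 1) := by
  induction n generalizing i with
  | zero => simp at h
  | succ n ih =>
    have h6 : i % 6 < 6 := Nat.mod_lt _ (by norm_num)
    rw [rcDigits_succ, rcDigits_succ]
    by_cases h5 : i % 6 = 5
    · have hmod : (i + 1) % 6 = 0 := by omega
      have hdiv : (i + 1) / 6 = i / 6 + 1 := by omega
      have hd : i / 6 + 1 + 1 ≤ 6 ^ n := by
        have := Nat.div_add_mod i 6
        have hp : 6 ^ (n + 1) = 6 * 6 ^ n := by rw [pow_succ]; ring
        omega
      rcases Nat.lt_or_ge (i / 6 + 1) (6 ^ n) with hd' | hd'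
      · rw [rcCarry, if_pos (by rw [h5]; norm_num), ih (i / 6) hd', hmod, hdiv]
        norm_num
      · -- i/6 + 1 = 6^n would give i + 1 = 6^(n+1), contradicting h
        exfalso
        have := Nat.div_add_mod i 6
        have hp : 6 ^ (n + 1) = 6 * 6 ^ n := by rw [pow_succ]; ring
        omega
    · have hmod : (i + 1) % 6 = i % 6 + 1 := by omega
      have hdiv : (i + 1) / 6 = i / 6 := by omega
      rw [rcCarry, if_neg (by push_cast; omega), hmod, hdiv]
      push_cast
      ring_nf

theorem rcStep_digits (n i : Nat) (h : i + 1 < 6 ^ n) :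
    rcStep (rcDigits n i) = rcDigits n (i + 1) := by
  cases n with
  | zero => simp at h
  | succ n =>
    have h6 : i % 6 < 6 := Nat.mod_lt _ (by norm_num)
    by_cases h5 : i % 6 = 5
    · -- head is 6: rcStep falls through to rcCarry on the whole list
      have hd : rcDigits (n + 1) i = (((i % 6 : Nat) : Int) + 1) :: rcDigits n (i / 6) :=
        rcDigits_succ n i
      rw [← rcCarry_digits (n + 1) i h, hd, h5]
      norm_num [rcStep]
    · rw [rcDigits_succ, rcStep, if_pos (by push_cast; omega),
        ← rcCarry_digits (n + 1) i h, rcDigits_succ, rcCarry,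
        if_neg (by push_cast; omega)]

theorem rcLoop_digits (fuel n i : Nat) (acc : List (List Int))
    (hi : i < 6 ^ n) (hf : 6 ^ n - 1 - i ≤ fuel) :
    rcLoop fuel (rcDigits n i) acc n =
      acc ++ (List.range' (i + 1) (6 ^ n - 1 - i)).map (rcDigits n) := by
  induction fuel generalizing i acc with
  | zero =>
    have : i = 6 ^ n - 1 := by omega
    simp [rcLoop, this]
  | succ fuel ih =>
    rw [rcLoop]
    by_cases hmax : i = 6 ^ n - 1
    · rw [if_pos (by rw [hmax]; exact rcDigits_max n), hmax]
      simp
    · have hlt : i + 1 < 6 ^ n := by omega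
      rw [if_neg (rcDigits_ne_max n i hlt), rcStep_digits n i hlt,
        ih (i + 1) (acc ++ [rcDigits n (i + 1)]) hlt (by omega)]
      have hcnt : 6 ^ n - 1 - i = (6 ^ n - 1 - (i + 1)) + 1 := by omega
      rw [hcnt, List.range'_succ, List.map_cons]
      simp

theorem rc_cons_range (f : Nat → List Int) (m : Nat) (hm : 1 ≤ m) :
    [f 0] ++ (List.range' 1 (m - 1)).map f = (List.range' 0 m).map f := by
  obtain ⟨k, rfl⟩ : ∃ k, m = k + 1 := ⟨m - 1, by omega⟩
  rw [List.range'_succ]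
  simp

theorem roll_comb_eq (dices : Int) :
    roll_comb dices = (List.range (6 ^ dices.toNat)).map (rcDigits dices.toNat) := by
  have h1 : (1:Nat) ≤ 6 ^ dices.toNat := Nat.one_le_pow _ _ (by norm_num)
  rw [roll_comb]
  rw [show List.replicate dices.toNat (1:Int) = rcDigits dices.toNat 0 from
    (rcDigits_zero _).symm]
  rw [rcLoop_digits (6 ^ dices.toNat) dices.toNat 0 _ h1 (by omega)]
  simp only [Nat.sub_zero]
  rw [List.range_eq_range', rc_cons_range (rcDigits dices.toNat) (6 ^ dices.toNat) h1]

-- ===== VERDICT (by name: the statement is the Claim_ definition above) =====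
theorem roll_comb_spec : Claim_equal_roll_comb := by
  intro dices _
  unfold Spec_roll_comb roll_comb_alt
  have hn : (if dices > 0 then dices.toNat else 0) = dices.toNat := by
    split <;> omega
  rw [hn, roll_comb_eq]
  rfl
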